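-- pv_equiv track=rewrite | github.com/swwho96/algo | baekjoon/container12/baekjoon_2565.py | cross_check
-- ===== SOURCE A (Python) =====
-- from bisect import bisect_left
--
-- def cross_check(line_list:list):
--     prev = [line_list[0][1]]
--     for a, b in line_list:
--         if prev[-1] < b:
--             prev.append(b)
--         else:
--             prev[bisect_left(prev, b)] = b
--     return len(line_list) - len(prev)
-- ===== SOURCE B (Python) =====
-- def cross_check(line_list: list):
--     # min lines to remove = n - length of longest strictly increasing subsequence
--     # of the b-values, via O(n^2) DP (dp[i] = LIS length ending at s[i]).
--     s = [b for _, b in line_list]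
--     dp = []
--     for x in s:
--         dp.append(1 + max((d for d, y in zip(dp, s) if y < x), default=0))
--     return len(line_list) - max(dp)
-- ===== Notes on version B (the rewrite author's own statement) =====
-- stated objective: alternative
-- what changed: Replaced the bisect-based patience-sorting pile (seeded with the first element and updated in place) by the classic O(n^2) longest-increasing-subsequence DP: dp[i] = 1 + max dp[j] over j<i with s[j] < s[i], answer n - max(dp).
import Mathlib
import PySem

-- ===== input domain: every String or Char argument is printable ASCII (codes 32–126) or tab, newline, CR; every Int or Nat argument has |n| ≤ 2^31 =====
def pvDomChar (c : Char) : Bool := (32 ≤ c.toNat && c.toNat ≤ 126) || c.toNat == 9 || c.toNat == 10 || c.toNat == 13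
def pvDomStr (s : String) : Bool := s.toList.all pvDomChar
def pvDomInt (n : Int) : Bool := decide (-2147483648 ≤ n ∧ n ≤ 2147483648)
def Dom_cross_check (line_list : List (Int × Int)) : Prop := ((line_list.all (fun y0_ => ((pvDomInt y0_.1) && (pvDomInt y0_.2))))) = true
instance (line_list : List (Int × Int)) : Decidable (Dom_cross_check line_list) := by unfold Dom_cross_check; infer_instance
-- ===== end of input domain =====

-- B replaces A's bisect-based patience pile by the classic O(n^2) LIS DP; equivalence of the
-- two LIS-length computations is proved below ("alternative" objective, not faster).

-- ===== PORT A =====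
-- bisect_left(prev, b): on a sorted list this is the length of the maximal prefix of
-- elements < b; A only calls it on prev, which the algorithm keeps strictly sorted
-- (proved below), so the takeWhile transcription is exact.
def pileStep (prev : List Int) (b : Int) : List Int :=
  if prev.getLastD 0 < b then prev ++ [b]
  else prev.set ((prev.takeWhile (fun y => decide (y < b))).length) b

def cross_check (line_list : List (Int × Int)) : Int :=
  match line_list with
  | [] => 0  -- Python raises IndexError on line_list[0]; excluded by Pre_
  | p0 :: _ =>
    let prev := line_list.foldl (fun prev ab => pileStep prev ab.2) [p0.2]
    (line_list.length : Int) - (prev.length : Int)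

-- ===== PORT B =====
-- max((d for d, y in zip(dp, s) if y < x), default=0)
def bestPrev (dp : List Nat) (s : List Int) (x : Int) : Nat :=
  (List.zip dp s).foldl (fun m dy => if dy.2 < x then max m dy.1 else m) 0

-- max(l) for a list of naturals; Python raises ValueError on [], excluded by Pre_
def pyMaxNat (l : List Nat) : Nat :=
  match l with
  | [] => 0
  | h :: t => t.foldl max h

def cross_check_alt (line_list : List (Int × Int)) : Int :=
  let s := line_list.map (fun ab => ab.2)
  let dp := s.foldl (fun dp x => dp ++ [1 + bestPrev dp s x]) []
  (line_list.length : Int) - ((pyMaxNat dp : Nat) : Int)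

-- ===== PRECONDITION & SPEC =====
-- Pre_ excludes only the empty list, on which A raises IndexError (and B raises ValueError).
def Pre_cross_check (line_list : List (Int × Int)) : Prop := line_list ≠ []
instance (line_list : List (Int × Int)) : Decidable (Pre_cross_check line_list) := by
  unfold Pre_cross_check; infer_instance

def pvWitness_cross_check : (List (Int × Int)) := [(1, 3), (2, 1), (3, 2)]

def Spec_cross_check (line_list : List (Int × Int)) (out : Int) : Prop := out = cross_check_alt line_list
instance (line_list : List (Int × Int)) (out : Int) : Decidable (Spec_cross_check line_list out) := by unfold Spec_cross_check; infer_instance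

-- ===== CLAIM (what is proved, stated in full; the proofs are below) =====
def Claim_equal_cross_check : Prop := ∀ (line_list : List (Int × Int)), Dom_cross_check line_list → Pre_cross_check line_list → Spec_cross_check line_list (cross_check line_list)

-- ===== LEMMAS AND PROOFS =====

-- fr r b: length of the longest strictly increasing subsequence of the prefix whose
-- REVERSAL is r, restricted to subsequences with last element < b.
def fr : List Int → Int → Nat
  | [], _ => 0
  | x :: r, b => max (fr r b) (if x < b then fr r x + 1 else 0)

-- gr r: length of the longest strictly increasing subsequence of the prefix reversed as r.
def gr : List Int → Nat
  | [] => 0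
  | x :: r => max (gr r) (fr r x + 1)

-- the DP table for the prefix reversed as r, in forward order
def dpl : List Int → List Nat
  | [] => []
  | x :: r => dpl r ++ [fr r x + 1]

theorem fr_mono {r : List Int} {b b' : Int} (h : b ≤ b') : fr r b ≤ fr r b' := by
  induction r with
  | nil => simp [fr]
  | cons x r ih =>
    simp only [fr]
    apply max_le_max ih
    split_ifs with h1 h2
    · exact le_refl _
    · exact absurd (lt_of_lt_of_le h1 h) h2
    · exact Nat.zero_le _
    · exact Nat.zero_le _

theorem fr_le_gr (r : List Int) (b : Int) : fr r b ≤ gr r := by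
  induction r with
  | nil => simp [fr, gr]
  | cons x r ih =>
    simp only [fr, gr]
    apply max_le_max ih
    split_ifs
    · exact le_refl _
    · exact Nat.zero_le _

-- ---------- A side ----------

def InvA (r prev : List Int) : Prop :=
  List.Pairwise (· < ·) prev ∧ prev ≠ [] ∧ prev.length = gr r ∧
  ∀ b, prev.countP (fun y => decide (y < b)) = fr r b

theorem countP_true_all {l : List Int} {p : Int → Bool} (h : ∀ y ∈ l, p y = true) :
    l.countP p = l.length := by
  induction l with
  | nil => rfl
  | cons x l ih =>
    rw [List.countP_cons, h x List.mem_cons_self, ih (fun y hy => h y (List.mem_cons_of_mem _ hy))]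
    simp

theorem countP_false_all {l : List Int} {p : Int → Bool} (h : ∀ y ∈ l, p y = false) :
    l.countP p = 0 := by
  induction l with
  | nil => rfl
  | cons x l ih =>
    rw [List.countP_cons, h x List.mem_cons_self, ih (fun y hy => h y (List.mem_cons_of_mem _ hy))]
    simp

theorem set_append_len {α : Type} (t rest : List α) (v : α) :
    (t ++ rest).set t.length v = t ++ rest.set 0 v := by
  induction t with
  | nil => simp
  | cons a t ih => simp [ih]

theorem dropWhile_cons_false {p : Int → Bool} {a : Int} {t : List Int} :
    ∀ {l : List Int}, l.dropWhile p = a :: t → p a = false := by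
  intro l
  induction l with
  | nil => intro h; simp at h
  | cons x l ih =>
    intro h
    by_cases hpx : p x
    · rw [List.dropWhile_cons, if_pos hpx] at h
      exact ih h
    · rw [List.dropWhile_cons, if_neg hpx] at h
      injection h with h1 _
      subst h1
      simpa using hpx

theorem getLastD_append_right (l1 l2 : List Int) (h : l2 ≠ []) (a : Int) :
    (l1 ++ l2).getLastD a = l2.getLastD a := by
  induction l1 generalizing a with
  | nil => rfl
  | cons x l1 ih =>
    cases l2 with
    | nil => exact absurd rfl h
    | cons y l2 => cases l1 <;> simp_all [List.getLastD]

theorem getLastD_mem (l : List Int) (h : l ≠ []) (a : Int) : l.getLastD a ∈ l := by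
  induction l generalizing a with
  | nil => exact absurd rfl h
  | cons x l ih =>
    cases l with
    | nil => simp [List.getLastD]
    | cons y t =>
      rw [List.getLastD]
      exact List.mem_cons_of_mem _ (ih (by simp) x)

theorem invA_step (r prev : List Int) (x : Int) (h : InvA r prev) :
    InvA (x :: r) (pileStep prev x) := by
  obtain ⟨hs, hne, hlen, hcnt⟩ := h
  set P : Int → Bool := fun y => decide (y < x) with hP
  have hdec := (List.takeWhile_append_dropWhile (p := P) (l := prev)).symm
  set t := prev.takeWhile P with ht
  set d := prev.dropWhile P with hd
  have htmem : ∀ y ∈ t, y < x := by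
    intro y hy
    have := List.mem_takeWhile_imp (ht ▸ hy)
    simpa [hP] using this
  have hdmem : ∀ y ∈ d, x ≤ y := by
    intro y hy
    rcases hd' : d with _ | ⟨d0, d'⟩
    · rw [hd'] at hy; simp at hy
    · have hd0 : P d0 = false := dropWhile_cons_false (hd ▸ hd')
      have hd0' : x ≤ d0 := by simpa [hP] using hd0
      rw [hd'] at hy
      rcases List.mem_cons.1 hy with rfl | hy'
      · exact hd0'
      · have hsd : List.Pairwise (· < ·) d := by
          have := hdec ▸ hs
          exact (List.pairwise_append.1 this).2.1
        rw [hd'] at hsd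
        have : d0 < y := (List.pairwise_cons.1 hsd).1 y hy'
        exact le_trans hd0' this.le
  have hcntt : t.countP P = t.length := countP_true_all (fun y hy => by simpa [hP] using htmem y hy)
  have hcntd : d.countP P = 0 := countP_false_all (fun y hy => by simpa [hP] using not_lt.2 (hdmem y hy))
  have hfrx : fr r x = t.length := by
    have h1 := hcnt x
    rw [hdec, List.countP_append] at h1
    rw [← hP] at h1
    rw [hcntt, hcntd] at h1
    omega
  by_cases hif : prev.getLastD 0 < x
  · -- append branch: d must be empty
    have hdnil : d = [] := by
      by_contra hdne
      have : prev.getLastD 0 ∈ d := by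
        rw [hdec, getLastD_append_right t d hdne 0]
        exact getLastD_mem d hdne 0
      exact absurd hif (not_lt.2 (hdmem _ this))
    have hprevt : prev = t := by rw [hdec, hdnil, List.append_nil]
    have hfull : fr r x = gr r := by rw [hfrx, ← hlen, hprevt]
    unfold pileStep
    rw [if_pos hif]
    refine ⟨?_, by simp, ?_, ?_⟩
    · rw [List.pairwise_append]
      refine ⟨hs, List.pairwise_singleton _ _, ?_⟩
      intro a ha b hb
      rw [List.mem_singleton] at hb
      subst hb
      exact htmem a (hprevt ▸ ha)
    · simp only [List.length_append, hlen, List.length_singleton, gr, hfull]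
      exact (max_eq_right (Nat.le_succ _)).symm
    · intro b
      rw [List.countP_append, hcnt b]
      simp only [fr]
      by_cases hxb : x < b
      · have h1 : fr r x ≤ fr r b := fr_mono (le_of_lt hxb)
        have h2 : fr r b ≤ gr r := fr_le_gr r b
        rw [hfull] at h1
        have h3 : fr r b = gr r := le_antisymm h2 h1
        have hmax : max (fr r b) (fr r x + 1) = fr r b + 1 := by
          rw [h3, hfull]
          exact max_eq_right (Nat.le_succ _)
        rw [if_pos hxb, hmax]
        simp [hxb]
      · rw [if_neg hxb]
        simp [hxb]
  · -- replace branch: d nonempty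
    have hdne : d ≠ [] := by
      intro hdnil
      have hprevt : prev = t := by rw [hdec, hdnil, List.append_nil]
      have hmem : prev.getLastD 0 ∈ t := hprevt ▸ getLastD_mem prev hne 0
      exact hif (htmem _ hmem)
    rcases hd' : d with _ | ⟨d0, d'⟩
    · exact absurd hd' hdne
    have hd0 : x ≤ d0 := hdmem d0 (by rw [hd']; exact List.mem_cons_self)
    have hsd : List.Pairwise (· < ·) (d0 :: d') := by
      have := hdec ▸ hs
      exact hd' ▸ (List.pairwise_append.1 this).2.1
    have hstl : ∀ a ∈ t, ∀ c ∈ d, a < c := by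
      have := hdec ▸ hs
      exact (List.pairwise_append.1 this).2.2
    have hset : prev.set t.length x = t ++ x :: d' := by
      rw [hdec, hd', set_append_len]; rfl
    have hfrlt : fr r x < gr r := by
      rw [hfrx, ← hlen, hdec, hd']
      simp
    unfold pileStep
    rw [if_neg hif, ← ht, hset]
    refine ⟨?_, by simp, ?_, ?_⟩
    · rw [List.pairwise_append]
      refine ⟨(List.pairwise_append.1 (hdec ▸ hs)).1, ?_, ?_⟩
      · rw [List.pairwise_cons]
        exact ⟨fun y hy => lt_of_le_of_lt hd0 ((List.pairwise_cons.1 hsd).1 y hy),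
               (List.pairwise_cons.1 hsd).2⟩
      · intro a ha b hb
        rcases List.mem_cons.1 hb with rfl | hb'
        · exact htmem a ha
        · exact hstl a ha b (by rw [hd']; exact List.mem_cons_of_mem _ hb')
    · have hl : (t ++ x :: d').length = prev.length := by
        rw [hdec, hd']; simp
      have hmax : max (gr r) (fr r x + 1) = gr r := max_eq_left (by omega)
      rw [hl, hlen]
      simp only [gr, hmax]
    · intro b
      simp only [fr]
      have hcb := hcnt b
      rw [hdec, hd', List.countP_append, List.countP_cons] at hcb
      rw [List.countP_append, List.countP_cons]
      by_cases hxb : x < b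
      · have hctb : t.countP (fun y => decide (y < b)) = t.length := countP_true_all (fun y hy => by
          simp only [decide_eq_true_eq]
          exact lt_trans (htmem y hy) hxb)
        by_cases hd0b : d0 < b
        · -- count unchanged; fr r x + 1 ≤ fr r b
          simp only [hctb, decide_eq_true_eq, if_pos hd0b] at hcb
          have hmax : max (fr r b) (fr r x + 1) = fr r b :=
            max_eq_left (by rw [hfrx]; omega)
          simp only [hctb, decide_eq_true_eq, if_pos hxb, hmax]
          omega
        · -- b ≤ d0: d' elements all > d0 ≥ b, t all < b
          have hcd' : d'.countP (fun y => decide (y < b)) = 0 := countP_false_all (fun y hy => by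
            have h1 : d0 < y := (List.pairwise_cons.1 hsd).1 y hy
            simp only [decide_eq_false_iff_not, not_lt]
            exact le_trans (le_of_not_gt hd0b) h1.le)
          simp only [hctb, hcd', decide_eq_true_eq, if_neg hd0b] at hcb
          have hmax : max (fr r b) (fr r x + 1) = fr r x + 1 :=
            max_eq_right (by rw [hfrx]; omega)
          simp only [hctb, hcd', decide_eq_true_eq, if_pos hxb, hfrx]
          omega
      · -- b ≤ x ≤ d0 < every element of d'
        have hPd0 : ¬ d0 < b := fun hlt => hxb (lt_of_le_of_lt hd0 hlt)
        simp only [decide_eq_true_eq, if_neg hPd0] at hcb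
        simp only [decide_eq_true_eq, if_neg hxb]
        rw [Nat.max_zero]
        omega

theorem invA_fold (rest : List Int) : ∀ (r prev : List Int), InvA r prev →
    InvA (rest.reverse ++ r) (rest.foldl pileStep prev) := by
  induction rest with
  | nil => intro r prev h; simpa using h
  | cons x rest ih =>
    intro r prev h
    have := ih (x :: r) (pileStep prev x) (invA_step r prev x h)
    simpa using this

theorem invA_base (x : Int) : InvA [x] [x] := by
  refine ⟨List.pairwise_singleton _ _, by simp, by simp [gr, fr], ?_⟩
  intro b
  simp only [List.countP_cons, List.countP_nil, fr]
  by_cases h : x < b <;> simp [h]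

-- ---------- B side ----------

theorem dpl_length (r : List Int) : (dpl r).length = r.length := by
  induction r with
  | nil => rfl
  | cons x r ih => simp [dpl, ih]

theorem zip_left_trunc {α β : Type} (l1 : List α) (l2 l3 : List β)
    (h : l1.length = l2.length) : List.zip l1 (l2 ++ l3) = List.zip l1 l2 := by
  induction l1 generalizing l2 with
  | nil => simp
  | cons a l1 ih =>
    cases l2 with
    | nil => simp at h
    | cons b l2 => simp [List.zip_cons_cons, ih l2 (by simpa using h)]

theorem bestPrev_eq (r : List Int) (x : Int) :
    (List.zip (dpl r) r.reverse).foldl (fun m dy => if dy.2 < x then max m dy.1 else m) 0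
      = fr r x := by
  induction r with
  | nil => simp [dpl, fr]
  | cons y r ih =>
    have hz : List.zip (dpl (y :: r)) (y :: r).reverse
        = List.zip (dpl r) r.reverse ++ [(fr r y + 1, y)] := by
      simp only [dpl, List.reverse_cons]
      rw [List.zip_append (by rw [dpl_length, List.length_reverse])]
      rfl
    rw [hz, List.foldl_append, ih]
    simp only [List.foldl_cons, List.foldl_nil, fr]
    split_ifs with hyx
    · rfl
    · exact (Nat.max_zero _).symm

theorem dp_fold (s : List Int) : ∀ (rest p : List Int), s = p ++ rest →
    rest.foldl (fun dp x => dp ++ [1 + bestPrev dp s x]) (dpl p.reverse)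
      = dpl s.reverse := by
  intro rest
  induction rest with
  | nil => intro p h; simp [h]
  | cons x rest ih =>
    intro p h
    have hstep : dpl p.reverse ++ [1 + bestPrev (dpl p.reverse) s x] = dpl (p ++ [x]).reverse := by
      unfold bestPrev
      rw [h, zip_left_trunc _ _ _ (by rw [dpl_length]; simp)]
      have hbp := bestPrev_eq p.reverse x
      rw [List.reverse_reverse] at hbp
      rw [hbp]
      simp [dpl, Nat.add_comm]
    simp only [List.foldl_cons, hstep]
    exact ih (p ++ [x]) (by simp [h])

theorem foldl_max_dpl (r : List Int) : (dpl r).foldl max 0 = gr r := by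
  induction r with
  | nil => rfl
  | cons x r ih => simp [dpl, List.foldl_append, ih, gr]

theorem pyMaxNat_eq_foldl (l : List Nat) : pyMaxNat l = l.foldl max 0 := by
  cases l with
  | nil => rfl
  | cons h t => simp [pyMaxNat, List.foldl_cons]

-- ===== VERDICT (by name: the statement is the Claim_ definition above) =====
theorem cross_check_spec : Claim_equal_cross_check := by
  intro line_list _ hpre
  unfold Spec_cross_check
  match hll : line_list with
  | [] => exact absurd rfl hpre
  | p0 :: tl =>
    unfold cross_check cross_check_alt
    simp only []
    set s : List Int := (p0 :: tl).map (fun ab => ab.2) with hs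
    -- A's fold over pairs is the fold of pileStep over s
    have hA : (p0 :: tl).foldl (fun prev ab => pileStep prev ab.2) [p0.2]
        = s.foldl pileStep [p0.2] := by
      rw [hs, List.foldl_map]
    set s' : List Int := tl.map (fun ab => ab.2) with hs'
    have hscons : s = p0.2 :: s' := by simp [hs, hs']
    -- first step of A is a no-op on the seed
    have hseed : pileStep [p0.2] p0.2 = [p0.2] := by
      simp [pileStep, List.takeWhile]
    have hAlen : (s.foldl pileStep [p0.2]).length = gr s.reverse := by
      rw [hscons, List.foldl_cons, hseed]
      have hinv := invA_fold s' [p0.2] [p0.2] (invA_base p0.2)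
      have hgr : (s'.reverse ++ [p0.2]) = s.reverse := by rw [hscons]; simp
      rw [hgr] at hinv
      exact hinv.2.2.1
    -- B's dp is the DP table
    have hB : s.foldl (fun dp x => dp ++ [1 + bestPrev dp s x]) [] = dpl s.reverse := by
      have := dp_fold s s [] (by simp)
      simpa [dpl] using this
    rw [hA, hB, hAlen, pyMaxNat_eq_foldl, foldl_max_dpl]
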